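-- pv_equiv track=rewrite | github.com/shan2312/DSA-Python-Solutions | Arrays/partition_sub_array.py | get_min_partition_length
-- ===== SOURCE A (Python) =====
-- def get_min_partition_length(arr):
--     max_elements = [arr[0]]
--     for index in range(1, len(arr)):
--         max_elements.append(max(max_elements[-1], arr[index]))
--
--     min_elements = [arr[-1]]
--     for index in range(len(arr) - 2, -1, -1):
--         min_elements.append(min(min_elements[-1], arr[index]))
--
--     for index, (min_element, max_element) in enumerate(zip(min_elements[::-1][1:], max_elements[:-1])):
--         if max_element <= min_element:
--             return (index + 1)
--
--     return len(arr)
-- ===== SOURCE B (Python) =====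
-- def get_min_partition_length(arr):
--     left_max = cur_max = arr[0]
--     partition = 1
--     for i in range(1, len(arr)):
--         if arr[i] < left_max:
--             partition = i + 1
--             left_max = cur_max
--         if arr[i] > cur_max:
--             cur_max = arr[i]
--     return partition
-- ===== Notes on version B (the rewrite author's own statement) =====
-- stated objective: faster
-- what changed: Replaces A's two materialized arrays (prefix maxima and reversed suffix minima) plus a zip scan by the classic one-pass greedy that keeps only three scalars (left_max, cur_max, partition), updating the partition point whenever an element drops below the current left max.
import Mathlib
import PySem

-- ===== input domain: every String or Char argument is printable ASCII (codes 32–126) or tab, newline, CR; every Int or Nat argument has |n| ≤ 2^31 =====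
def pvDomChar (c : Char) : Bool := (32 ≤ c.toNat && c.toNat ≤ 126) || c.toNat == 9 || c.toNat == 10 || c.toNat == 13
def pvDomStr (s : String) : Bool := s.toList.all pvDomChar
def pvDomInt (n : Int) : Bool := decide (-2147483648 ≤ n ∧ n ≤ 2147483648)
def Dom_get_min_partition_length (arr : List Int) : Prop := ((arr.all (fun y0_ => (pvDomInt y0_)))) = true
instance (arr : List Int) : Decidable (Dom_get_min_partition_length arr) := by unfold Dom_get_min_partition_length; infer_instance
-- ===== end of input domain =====

-- B replaces A's materialized prefix-max and suffix-min arrays and zip scan by the classic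
-- one-pass greedy with O(1) scalar state (left_max / cur_max / partition); same return value.

-- ===== PORT A =====
-- the early-return loop over enumerate(zip(min_elements[::-1][1:], max_elements[:-1]))
def pvALoop : List (Int × Int) → Int → Option Int
  | [], _ => none
  | (mn, mx) :: rest, idx => if mx ≤ mn then some (idx + 1) else pvALoop rest (idx + 1)

def get_min_partition_length (arr : List Int) : Int :=
  match arr with
  | [] => 0
  | a :: l =>
    let maxEls := (l.foldl (fun (p : List Int × Int) x =>
      (p.1 ++ [max p.2 x], max p.2 x)) ([a], a)).1
    let lastEl := (a :: l).getLast (by simp)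
    let minEls := (((a :: l).dropLast.reverse).foldl (fun (p : List Int × Int) x =>
      (p.1 ++ [min p.2 x], min p.2 x)) ([lastEl], lastEl)).1
    let pairs := ((minEls.reverse).drop 1).zip (maxEls.dropLast)
    match pvALoop pairs 0 with
    | some r => r
    | none => ((a :: l).length : Int)

-- ===== PORT B =====
def pvBLoop : List Int → Int → Int → Int → Int → Int
  | [], _, _, part, _ => part
  | x :: rest, leftMax, curMax, part, i =>
    let part' := if x < leftMax then i + 1 else part
    let leftMax' := if x < leftMax then curMax else leftMax
    let curMax' := if x > curMax then x else curMax
    pvBLoop rest leftMax' curMax' part' (i + 1)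

def get_min_partition_length_alt (arr : List Int) : Int :=
  match arr with
  | [] => 0
  | a :: l => pvBLoop l a a 1 1

-- ===== PRECONDITION & SPEC =====
-- Python A evaluates arr[0] first, so it raises IndexError on the empty list; that is all Pre_ excludes.
def Pre_get_min_partition_length (arr : List Int) : Prop := arr ≠ []
instance (arr : List Int) : Decidable (Pre_get_min_partition_length arr) := by
  unfold Pre_get_min_partition_length; infer_instance
def pvWitness_get_min_partition_length : List Int := [2, 1, 3]

def Spec_get_min_partition_length (arr : List Int) (out : Int) : Prop := out = get_min_partition_length_alt arr
instance (arr : List Int) (out : Int) : Decidable (Spec_get_min_partition_length arr out) := by unfold Spec_get_min_partition_length; infer_instance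

-- ===== CLAIM (what is proved, stated in full; the proofs are below) =====
def Claim_equal_get_min_partition_length : Prop := ∀ (arr : List Int), Dom_get_min_partition_length arr → Pre_get_min_partition_length arr → Spec_get_min_partition_length arr (get_min_partition_length arr)

-- ===== LEMMAS AND PROOFS =====
-- Both ports are shown to return pvSpecK a l + 1 on input a :: l, where pvSpecK a l is the
-- smallest k such that every element of l after its first k is ≥ the max of a and those first k.
def pvCb (a : Int) (l : List Int) (k : Nat) : Bool :=
  (l.drop k).all (fun x => decide ((l.take k).foldl max a ≤ x))

lemma pvCb_len (a : Int) (l : List Int) : pvCb a l l.length = true := by simp [pvCb]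

def pvSpecK (a : Int) (l : List Int) : Nat :=
  Nat.find (⟨l.length, pvCb_len a l⟩ : ∃ k, pvCb a l k = true)

lemma pvFoldMax_take_le (b : Int) (s : List Int) (p q : Nat) (h : p ≤ q) :
    (s.take p).foldl max b ≤ (s.take q).foldl max b := by
  have h1 : s.take q = s.take p ++ (s.take q).drop p := by
    conv_lhs => rw [← List.take_append_drop p (s.take q)]
    rw [List.take_take, Nat.min_eq_left h]
  calc (s.take p).foldl max b ≤ ((s.take p).foldl max b) := le_rfl
    _ ≤ ((s.take q).drop p).foldl max ((s.take p).foldl max b) := (PySem.List.le_foldl_max _ _).1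
    _ = (s.take q).foldl max b := by rw [← List.foldl_append, ← h1]

lemma pvBLoop_spec (a : Int) : ∀ (rest seen : List Int) (p : Nat),
    p ≤ seen.length →
    (∀ y ∈ seen.drop p, (seen.take p).foldl max a ≤ y) →
    (∀ q, q < p → ∃ y ∈ seen.drop q, y < (seen.take q).foldl max a) →
    pvBLoop rest ((seen.take p).foldl max a) (seen.foldl max a) ((p : Int) + 1) ((seen.length : Int) + 1)
      = (pvSpecK a (seen ++ rest) : Int) + 1 := by
  intro rest
  induction rest with
  | nil =>
    intro seen p hp h2 h3
    have hfind : pvSpecK a seen = p := by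
      rw [pvSpecK, Nat.find_eq_iff]
      constructor
      · simpa [pvCb] using h2
      · intro n hn hcb
        obtain ⟨y, hy, hlt⟩ := h3 n hn
        simp [pvCb, List.all_eq_true] at hcb
        exact absurd (hcb y hy) (by omega)
    simp [pvBLoop, hfind]
  | cons x rest ih =>
    intro seen p hp h2 h3
    simp only [pvBLoop]
    have hdropq : ∀ q : Nat, q ≤ seen.length → (seen ++ [x]).drop q = seen.drop q ++ [x] := by
      intro q hq; rw [List.drop_append]; simp [Nat.sub_eq_zero_of_le hq]
    have htakeq : ∀ q : Nat, q ≤ seen.length → (seen ++ [x]).take q = seen.take q := by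
      intro q hq; exact List.take_append_of_le_length hq
    by_cases hx : x < (seen.take p).foldl max a
    · -- new partition: p' = seen.length + 1
      have hle : (seen.take p).foldl max a ≤ seen.foldl max a := by
        have := pvFoldMax_take_le a seen p seen.length (by omega)
        simpa using this
      have hcm : (seen ++ [x]).foldl max a = seen.foldl max a := by
        simp [List.foldl_append]; omega
      have h2' : ∀ y ∈ (seen ++ [x]).drop (seen ++ [x]).length,
          ((seen ++ [x]).take (seen ++ [x]).length).foldl max a ≤ y := by simp
      have h3' : ∀ q, q < (seen ++ [x]).length → ∃ y ∈ (seen ++ [x]).drop q, y < ((seen ++ [x]).take q).foldl max a := by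
        intro q hq
        simp only [List.length_append, List.length_cons, List.length_nil] at hq
        have hq' : q ≤ seen.length := by omega
        rw [hdropq q hq', htakeq q hq']
        by_cases hqp : q < p
        · obtain ⟨y, hy, hlt⟩ := h3 q hqp
          exact ⟨y, List.mem_append_left _ hy, hlt⟩
        · refine ⟨x, List.mem_append_right _ (by simp), ?_⟩
          have := pvFoldMax_take_le a seen p q (by omega)
          omega
      have := ih (seen ++ [x]) (seen ++ [x]).length le_rfl h2' h3'
      rw [List.take_length] at this
      simp only [hcm] at this
      have hgt : ¬ (x > seen.foldl max a) := by omega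
      simp only [if_pos hx, if_neg hgt]
      have hl : seen ++ x :: rest = (seen ++ [x]) ++ rest := by simp
      rw [hl]
      simp only [List.length_append, List.length_cons, List.length_nil] at this
      push_cast at this ⊢
      convert this using 2
    · -- partition unchanged
      have hcm : (if x > seen.foldl max a then x else seen.foldl max a) = (seen ++ [x]).foldl max a := by
        simp [List.foldl_append]; rcases le_or_gt x (seen.foldl max a) with h | h
        · simp [not_lt.mpr h]; omega
        · simp [h]; omega
      have h2' : ∀ y ∈ (seen ++ [x]).drop p, ((seen ++ [x]).take p).foldl max a ≤ y := by
        rw [hdropq p hp, htakeq p hp]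
        intro y hy
        rcases List.mem_append.1 hy with h | h
        · exact h2 y h
        · simp at h; omega
      have h3' : ∀ q, q < p → ∃ y ∈ (seen ++ [x]).drop q, y < ((seen ++ [x]).take q).foldl max a := by
        intro q hq
        rw [hdropq q (by omega), htakeq q (by omega)]
        obtain ⟨y, hy, hlt⟩ := h3 q hq
        exact ⟨y, List.mem_append_left _ hy, hlt⟩
      have := ih (seen ++ [x]) p (by simp; omega) h2' h3'
      rw [htakeq p hp] at this
      simp only [if_neg hx]
      rw [hcm]
      have hl : seen ++ x :: rest = (seen ++ [x]) ++ rest := by simp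
      rw [hl]
      simp only [List.length_append, List.length_cons, List.length_nil] at this
      push_cast at this ⊢
      convert this using 2

lemma pvB_eq (a : Int) (l : List Int) :
    get_min_partition_length_alt (a :: l) = (pvSpecK a l : Int) + 1 := by
  have := pvBLoop_spec a l [] 0 (by simp) (by simp) (by omega)
  simpa [get_min_partition_length_alt] using this

-- ===== A side =====

def pvScan (f : Int → Int → Int) : Int → List Int → List Int
  | _, [] => []
  | b, x :: t => f b x :: pvScan f (f b x) t

lemma pvScan_fold (f : Int → Int → Int) :
    ∀ (l acc : List Int) (b : Int),
      l.foldl (fun (p : List Int × Int) x => (p.1 ++ [f p.2 x], f p.2 x)) (acc, b)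
        = (acc ++ pvScan f b l, l.foldl f b) := by
  intro l
  induction l with
  | nil => intro acc b; simp [pvScan]
  | cons x t ih => intro acc b; simp only [List.foldl_cons, pvScan]; rw [ih]; simp

lemma pvScan_length (f : Int → Int → Int) :
    ∀ (l : List Int) (b : Int), (pvScan f b l).length = l.length := by
  intro l
  induction l with
  | nil => intro b; simp [pvScan]
  | cons x t ih => intro b; simp [pvScan, ih]

lemma pvScan_getElem (f : Int → Int → Int) :
    ∀ (l : List Int) (b : Int) (k : Nat) (h : k < l.length),
      (pvScan f b l)[k]'(by rw [pvScan_length]; exact h) = (l.take (k + 1)).foldl f b := by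
  intro l
  induction l with
  | nil => intro b k h; simp at h
  | cons x t ih =>
    intro b k h
    cases k with
    | zero => simp [pvScan]
    | succ k =>
      simp only [pvScan, List.getElem_cons_succ, List.take_succ_cons, List.foldl_cons]
      exact ih (f b x) k (by simpa using h)

lemma pv_le_foldl_min (c : Int) : ∀ (s : List Int) (b : Int),
    (c ≤ s.foldl min b ↔ c ≤ b ∧ ∀ x ∈ s, c ≤ x) := by
  intro s
  induction s with
  | nil => intro b; simp
  | cons x t ih =>
    intro b
    rw [List.foldl_cons, ih (min b x)]
    simp only [le_min_iff, List.mem_cons]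
    constructor
    · rintro ⟨⟨h1, h2⟩, h3⟩
      exact ⟨h1, fun y hy => by rcases hy with rfl | hy; exact h2; exact h3 y hy⟩
    · rintro ⟨h1, h2⟩
      exact ⟨⟨h1, h2 x (Or.inl rfl)⟩, fun y hy => h2 y (Or.inr hy)⟩

lemma pvALoop_none : ∀ (ps : List (Int × Int)) (i : Int),
    (∀ k (h : k < ps.length), ¬ ((ps[k]).2 ≤ (ps[k]).1)) → pvALoop ps i = none := by
  intro ps
  induction ps with
  | nil => intro i _; rfl
  | cons p t ih =>
    intro i h
    obtain ⟨mn, mx⟩ := p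
    have h0 := h 0 (by simp)
    simp only [List.getElem_cons_zero] at h0
    simp only [pvALoop, if_neg h0]
    exact ih (i + 1) (fun k hk => h (k + 1) (by simpa using Nat.succ_lt_succ hk))

lemma pvALoop_some : ∀ (ps : List (Int × Int)) (i : Int) (j : Nat) (h : j < ps.length),
    ((ps[j]).2 ≤ (ps[j]).1) →
    (∀ k (hk : k < j), ¬ ((ps[k]'(by omega)).2 ≤ (ps[k]'(by omega)).1)) →
    pvALoop ps i = some (i + j + 1) := by
  intro ps
  induction ps with
  | nil => intro i j h; simp at h
  | cons p t ih =>
    intro i j h hj hmin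
    obtain ⟨mn, mx⟩ := p
    cases j with
    | zero =>
      simp only [List.getElem_cons_zero] at hj
      simp [pvALoop, hj]
    | succ j =>
      have h0 := hmin 0 (by omega)
      simp only [List.getElem_cons_zero] at h0
      simp only [pvALoop, if_neg h0]
      rw [ih (i + 1) j (by simpa using h) (by simpa using hj)
        (fun k hk => by simpa using hmin (k + 1) (by omega))]
      congr 1
      push_cast
      ring

lemma pvScanCons_getElem (f : Int → Int → Int) (b : Int) (l : List Int) (j : Nat)
    (h : j < l.length + 1) :
    (b :: pvScan f b l)[j]'(by simp [pvScan_length]; omega) = (l.take j).foldl f b := by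
  cases j with
  | zero => simp
  | succ j' =>
    simp only [List.getElem_cons_succ]
    rw [pvScan_getElem f l b j' (by omega)]

lemma pvMxList_length (a : Int) (l : List Int) :
    ((a :: pvScan max a l).dropLast).length = l.length := by
  simp [pvScan_length]

lemma pvMx_get (a : Int) (l : List Int) (k : Nat) (h : k < l.length) :
    ((a :: pvScan max a l).dropLast)[k]'(by rw [pvMxList_length]; exact h)
      = (l.take k).foldl max a := by
  rw [List.getElem_dropLast]
  cases k with
  | zero => simp
  | succ k =>
    simp only [List.getElem_cons_succ]
    rw [pvScan_getElem max l a k (by omega)]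

lemma pvMnList_length (a : Int) (l : List Int) (hl : l ≠ []) :
    (((l.getLast hl :: pvScan min (l.getLast hl) (l.dropLast.reverse ++ [a])).reverse.drop 1)).length
      = l.length := by
  have h1 : l.dropLast.length = l.length - 1 := by simp
  have h2 : 0 < l.length := List.length_pos_of_ne_nil hl
  simp [pvScan_length, h1]
  omega

lemma pvMn_le_iff (a : Int) (l : List Int) (hl : l ≠ []) (k : Nat) (h : k < l.length) (c : Int) :
    (c ≤ ((l.getLast hl :: pvScan min (l.getLast hl) (l.dropLast.reverse ++ [a])).reverse.drop 1)[k]'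
        (by rw [pvMnList_length a l hl]; exact h)
      ↔ ∀ x ∈ l.drop k, c ≤ x) := by
  have hlen : 0 < l.length := List.length_pos_of_ne_nil hl
  set lastEl := l.getLast hl with hlast
  set rl := l.dropLast.reverse ++ [a] with hrl
  have hrll : rl.length = l.length := by simp [hrl]; omega
  have hminlen : (lastEl :: pvScan min lastEl rl).length = l.length + 1 := by
    simp [pvScan_length, hrll]
  obtain ⟨j, hj⟩ : ∃ j, j = l.length - 1 - k := ⟨_, rfl⟩
  have hjk : j ≤ l.length - 1 := by omega
  -- step 1: index through drop and reverse
  have e1 : ((lastEl :: pvScan min lastEl rl).reverse.drop 1)[k]'(by rw [pvMnList_length a l hl]; exact h)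
      = (lastEl :: pvScan min lastEl rl)[j]'(by rw [hminlen]; omega) := by
    rw [List.getElem_drop]
    rw [List.getElem_reverse]
    congr 1
    rw [hminlen]
    omega
  -- step 2: the j-th min element is the fold over rl.take j
  have e2 : (lastEl :: pvScan min lastEl rl)[j]'(by rw [hminlen]; omega)
      = (rl.take j).foldl min lastEl := by
    exact pvScanCons_getElem min lastEl rl j (by omega)
  -- step 3: rl.take j = (l.dropLast.drop k).reverse
  have e3 : rl.take j = (l.dropLast.drop k).reverse := by
    rw [hrl, List.take_append_of_le_length (by simp; omega), List.take_reverse]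
    congr 1
    simp
    omega
  -- step 4: l.drop k = l.dropLast.drop k ++ [lastEl]
  have e4 : l.drop k = l.dropLast.drop k ++ [lastEl] := by
    conv_lhs => rw [← List.dropLast_append_getLast hl]
    rw [List.drop_append]
    congr 1
    rw [show k - l.dropLast.length = 0 by simp; omega]
    rfl
  rw [e1, e2, e3, pv_le_foldl_min, e4]
  constructor
  · rintro ⟨h1, h2⟩ x hx
    rcases List.mem_append.1 hx with hx | hx
    · exact h2 x (List.mem_reverse.2 hx)
    · simp at hx; omega
  · intro hx
    refine ⟨hx lastEl (List.mem_append_right _ (by simp)), fun x hm => ?_⟩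
    exact hx x (List.mem_append_left _ (List.mem_reverse.1 hm))

lemma pvSpecK_spec (a : Int) (l : List Int) : pvCb a l (pvSpecK a l) = true :=
  Nat.find_spec (⟨l.length, pvCb_len a l⟩ : ∃ k, pvCb a l k = true)

lemma pvSpecK_min (a : Int) (l : List Int) {k : Nat} (h : k < pvSpecK a l) :
    ¬ pvCb a l k = true :=
  Nat.find_min (⟨l.length, pvCb_len a l⟩ : ∃ k, pvCb a l k = true) h

lemma pvSpecK_le (a : Int) (l : List Int) : pvSpecK a l ≤ l.length :=
  Nat.find_le (pvCb_len a l)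

lemma pvA_eq (a : Int) (l : List Int) :
    get_min_partition_length (a :: l) = (pvSpecK a l : Int) + 1 := by
  by_cases hl : l = []
  · subst hl
    have h0 : pvSpecK a [] = 0 := by
      rw [pvSpecK, Nat.find_eq_zero]; simp [pvCb]
    simp [get_min_partition_length, pvALoop, h0]
  · have hlen : 0 < l.length := List.length_pos_of_ne_nil hl
    simp only [get_min_partition_length]
    rw [pvScan_fold max l [a] a]
    rw [List.getLast_cons hl, List.dropLast_cons_of_ne_nil hl, List.reverse_cons]
    rw [pvScan_fold min (l.dropLast.reverse ++ [a]) [l.getLast hl] (l.getLast hl)]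
    simp only [List.singleton_append]
    have hplen : (((l.getLast hl :: pvScan min (l.getLast hl) (l.dropLast.reverse ++ [a])).reverse.drop 1).zip
        ((a :: pvScan max a l).dropLast)).length = l.length := by
      rw [List.length_zip, pvMnList_length a l hl, pvMxList_length]
      simp
    have hcond : ∀ (k : Nat) (hk : k < l.length),
        ((((l.getLast hl :: pvScan min (l.getLast hl) (l.dropLast.reverse ++ [a])).reverse.drop 1).zip
          ((a :: pvScan max a l).dropLast))[k]'(by rw [hplen]; exact hk)).2 ≤
        ((((l.getLast hl :: pvScan min (l.getLast hl) (l.dropLast.reverse ++ [a])).reverse.drop 1).zip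
          ((a :: pvScan max a l).dropLast))[k]'(by rw [hplen]; exact hk)).1
        ↔ pvCb a l k = true := by
      intro k hk
      rw [List.getElem_zip]
      simp only
      rw [pvMx_get a l k hk, pvMn_le_iff a l hl k hk]
      simp [pvCb, List.all_eq_true]
    rcases Nat.lt_or_ge (pvSpecK a l) l.length with hlt | hge
    · have hsome := pvALoop_some _ 0 (pvSpecK a l) (by rw [hplen]; exact hlt)
        ((hcond _ hlt).2 (pvSpecK_spec a l))
        (fun k hk => by
          rw [hcond k (lt_trans hk hlt)]
          exact pvSpecK_min a l hk)
      rw [hsome]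
      push_cast
      ring
    · have heq : pvSpecK a l = l.length := le_antisymm (pvSpecK_le a l) hge
      have hnone := pvALoop_none _ 0 (fun k hk => by
        have hk' : k < l.length := by rw [hplen] at hk; exact hk
        rw [hcond k hk']
        exact pvSpecK_min a l (by omega))
      rw [hnone]
      simp [heq]

-- ===== VERDICT (by name: the statement is the Claim_ definition above) =====
theorem get_min_partition_length_spec : Claim_equal_get_min_partition_length := by
  intro arr _ hpre
  cases arr with
  | nil => exact absurd rfl hpre
  | cons a l =>
    simp only [Spec_get_min_partition_length]
    rw [pvA_eq, pvB_eq]
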